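-- pv_equiv track=rewrite | github.com/olga3n/adventofcode | 2025/day_08_playground_1.py | build_circuits
-- ===== SOURCE A (Python) =====
-- from typing import Dict, Iterable, List, Tuple
--
-- def calc_distances(
--     positions: List[Tuple[int, ...]],
-- ) -> Dict[Tuple[int, int], int]:
--
--     distances = {}
--
--     for i in range(len(positions)):
--         for j in range(i + 1, len(positions)):
--             distances[(i, j)] = (
--                 (positions[i][0] - positions[j][0]) ** 2 +
--                 (positions[i][1] - positions[j][1]) ** 2 +
--                 (positions[i][2] - positions[j][2]) ** 2
--             )
--
--     return distances
--
-- def build_circuits(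
--     positions: List[Tuple[int, ...]], max_connections: int,
-- ) -> List[int]:
--     distances = calc_distances(positions)
--     sorted_distances = sorted(distances.items(), key=lambda x: x[1])
--     circuits = [i for i in range(len(positions))]
--
--     for (index_1, index_2), _ in sorted_distances[:max_connections]:
--         if circuits[index_1] != circuits[index_2]:
--             prev_circuit = circuits[index_2]
--             for i in range(len(circuits)):
--                 if circuits[i] == prev_circuit:
--                     circuits[i] = circuits[index_1]
--
--     return circuits
-- ===== SOURCE B (Python) =====
-- def build_circuits(positions, max_connections):
--     n = len(positions)
--     edges = []
--     for i in range(n):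
--         for j in range(i + 1, n):
--             d = (
--                 (positions[i][0] - positions[j][0]) ** 2 +
--                 (positions[i][1] - positions[j][1]) ** 2 +
--                 (positions[i][2] - positions[j][2]) ** 2
--             )
--             edges.append((d, i, j))
--     edges.sort(key=lambda e: e[0])
--     labels = list(range(n))
--     members = {i: [i] for i in range(n)}
--     for _, i, j in edges[:max_connections]:
--         a, b = labels[i], labels[j]
--         if a != b:
--             for x in members[b]:
--                 labels[x] = a
--             members[a] = members[a] + members[b]
--     return labels
-- ===== Notes on version B (the rewrite author's own statement) =====
-- stated objective: alternative
-- what changed: A relabels components by scanning the entire circuits array once per accepted edge; B keeps a dict from label to its member indices and relabels only the absorbed component's members (the inner full scan disappears), reading edges from a flat sorted list of (dist,i,j) triples instead of a dict keyed by index pairs.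
import Mathlib
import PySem

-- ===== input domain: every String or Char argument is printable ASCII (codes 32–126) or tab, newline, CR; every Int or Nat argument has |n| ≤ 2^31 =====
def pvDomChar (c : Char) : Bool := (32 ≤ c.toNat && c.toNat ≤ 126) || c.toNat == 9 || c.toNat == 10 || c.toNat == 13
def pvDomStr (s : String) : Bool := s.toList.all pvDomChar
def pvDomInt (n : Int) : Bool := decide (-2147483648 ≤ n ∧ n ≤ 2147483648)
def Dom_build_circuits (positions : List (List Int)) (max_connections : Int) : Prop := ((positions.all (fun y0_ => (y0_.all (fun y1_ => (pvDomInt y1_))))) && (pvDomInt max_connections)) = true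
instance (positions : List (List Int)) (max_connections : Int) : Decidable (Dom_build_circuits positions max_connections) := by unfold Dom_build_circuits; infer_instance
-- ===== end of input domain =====

-- B replaces A's per-merge scan of the whole label array by a dict from label to the list of its
-- members, so a merge relabels only the members of the absorbed component (objective: alternative).

-- ===== PORT A =====
-- loop body of A's merge loop (the Python 'for (index_1, index_2), _ in …' body)
def pvStepA (circuits : List (Int)) (e : (Int × Int) × Int) : List Int :=
  if PySem.List.pyGetD circuits e.1.1 0 ≠ PySem.List.pyGetD circuits e.1.2 0 then
    let prev := PySem.List.pyGetD circuits e.1.2 0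
    (PySem.List.pyRange 0 (PySem.List.len circuits) 1).foldl
      (fun cs i =>
        if PySem.List.pyGetD cs i 0 = prev
        then PySem.List.pySetD cs i (PySem.List.pyGetD cs e.1.1 0) else cs)
      circuits
  else circuits

def calc_distances (positions : List (List Int)) : PySem.Dict (Int × Int) Int :=
  (PySem.List.pyRange 0 (PySem.List.len positions) 1).foldl (fun distances i =>
    (PySem.List.pyRange (i + 1) (PySem.List.len positions) 1).foldl (fun distances j =>
      distances.insert (i, j)
        ((PySem.List.pyGetD (PySem.List.pyGetD positions i []) 0 0
            - PySem.List.pyGetD (PySem.List.pyGetD positions j []) 0 0) ^ 2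
          + (PySem.List.pyGetD (PySem.List.pyGetD positions i []) 1 0
            - PySem.List.pyGetD (PySem.List.pyGetD positions j []) 1 0) ^ 2
          + (PySem.List.pyGetD (PySem.List.pyGetD positions i []) 2 0
            - PySem.List.pyGetD (PySem.List.pyGetD positions j []) 2 0) ^ 2))
      distances)
    PySem.Dict.empty

def build_circuits (positions : List (List Int)) (max_connections : Int) : List Int :=
  let distances := calc_distances positions
  let sorted_distances := PySem.List.sorted distances.items (fun x => x.2)
  let circuits := (PySem.List.pyRange 0 (PySem.List.len positions) 1).map (fun i => i)
  (PySem.List.slice sorted_distances none (some max_connections)).foldl pvStepA circuits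

-- ===== PORT B =====
-- loop body of B's merge loop (the Python 'for _, i, j in edges[:max_connections]' body)
def pvStepB (st : List Int × PySem.Dict Int (List Int)) (e : Int × Int × Int) :
    List Int × PySem.Dict Int (List Int) :=
  let a := PySem.List.pyGetD st.1 e.2.1 0
  let b := PySem.List.pyGetD st.1 e.2.2 0
  if a ≠ b then
    let mb := st.2.getD b []
    (mb.foldl (fun ls x => PySem.List.pySetD ls x a) st.1,
     st.2.modify a [] (fun l => l ++ mb))
  else st

def build_circuits_alt (positions : List (List Int)) (max_connections : Int) : List Int :=
  let n := PySem.List.len positions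
  let edges := (PySem.List.pyRange 0 n 1).foldl (fun edges i =>
    (PySem.List.pyRange (i + 1) n 1).foldl (fun edges j =>
      edges ++ [(((PySem.List.pyGetD (PySem.List.pyGetD positions i []) 0 0
            - PySem.List.pyGetD (PySem.List.pyGetD positions j []) 0 0) ^ 2
          + (PySem.List.pyGetD (PySem.List.pyGetD positions i []) 1 0
            - PySem.List.pyGetD (PySem.List.pyGetD positions j []) 1 0) ^ 2
          + (PySem.List.pyGetD (PySem.List.pyGetD positions i []) 2 0
            - PySem.List.pyGetD (PySem.List.pyGetD positions j []) 2 0) ^ 2), i, j)])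
      edges)
    ([] : List (Int × Int × Int))
  let sortedEdges := PySem.List.sorted edges (fun e => e.1)
  let labels := PySem.List.pyRange 0 n 1
  let members := (PySem.List.pyRange 0 n 1).foldl (fun d i => d.insert i [i])
    (PySem.Dict.empty : PySem.Dict Int (List Int))
  ((PySem.List.slice sortedEdges none (some max_connections)).foldl pvStepB (labels, members)).1

-- ===== PRECONDITION & SPEC =====
-- Pre_ excludes exactly the inputs where Python A raises IndexError: some position row with
-- fewer than 3 coordinates while at least two positions exist (so a distance is computed).
def Pre_build_circuits (positions : List (List Int)) (max_connections : Int) : Prop :=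
  positions.length ≤ 1 ∨ ∀ p ∈ positions, 3 ≤ p.length
instance (positions : List (List Int)) (max_connections : Int) : Decidable (Pre_build_circuits positions max_connections) := by unfold Pre_build_circuits; infer_instance
def pvWitness_build_circuits : List (List Int) × Int := ([[0,0,0],[1,2,2],[3,3,3]], 2)

def Spec_build_circuits (positions : List (List Int)) (max_connections : Int) (out : List Int) : Prop := out = build_circuits_alt positions max_connections
instance (positions : List (List Int)) (max_connections : Int) (out : List Int) : Decidable (Spec_build_circuits positions max_connections out) := by unfold Spec_build_circuits; infer_instance

-- ===== CLAIM (what is proved, stated in full; the proofs are below) =====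
def Claim_equal_build_circuits : Prop := ∀ (positions : List (List Int)) (max_connections : Int), Dom_build_circuits positions max_connections → Pre_build_circuits positions max_connections → Spec_build_circuits positions max_connections (build_circuits positions max_connections)

-- ===== LEMMAS AND PROOFS =====

-- the squared distance of the pair p = (i, j), exactly the inline expression of both ports
def pvDist (positions : List (List Int)) (p : Int × Int) : Int :=
  (PySem.List.pyGetD (PySem.List.pyGetD positions p.1 []) 0 0
      - PySem.List.pyGetD (PySem.List.pyGetD positions p.2 []) 0 0) ^ 2
    + (PySem.List.pyGetD (PySem.List.pyGetD positions p.1 []) 1 0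
      - PySem.List.pyGetD (PySem.List.pyGetD positions p.2 []) 1 0) ^ 2
    + (PySem.List.pyGetD (PySem.List.pyGetD positions p.1 []) 2 0
      - PySem.List.pyGetD (PySem.List.pyGetD positions p.2 []) 2 0) ^ 2

-- all index pairs (i, j) with 0 ≤ i < j < n, in A's (and B's) generation order
def pvPairs (n : Nat) : List (Int × Int) :=
  (PySem.List.pyRange 0 n 1).flatMap (fun i =>
    (PySem.List.pyRange (i + 1) n 1).map (fun j => (i, j)))

-- items-of-A ↦ edges-of-B reindexing
def pvPhi (q : (Int × Int) × Int) : Int × Int × Int := (q.2, q.1.1, q.1.2)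

-- the invariant tying B's members dict to the label array
def pvInv (circuits : List Int) (members : PySem.Dict Int (List Int)) : Prop :=
  ∀ l ∈ circuits, ∀ x : Int,
    x ∈ members.getD l [] ↔ ∃ t : Nat, t < circuits.length ∧ x = (t : Int) ∧ circuits.getD t 0 = l

theorem pv_foldl_flatMap {α β γ : Type} (l : List α) (g : α → List β) (step : γ → β → γ)
    (init : γ) :
    (l.flatMap g).foldl step init = l.foldl (fun acc i => (g i).foldl step acc) init := by
  induction l generalizing init with
  | nil => rfl
  | cons x xs ih => simp [List.flatMap_cons, List.foldl_append, ih]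

theorem pv_mem_pairs {n : Nat} {p : Int × Int} (h : p ∈ pvPairs n) :
    0 ≤ p.1 ∧ p.1 < p.2 ∧ p.2 < (n : Int) := by
  simp only [pvPairs, List.mem_flatMap, List.mem_map, PySem.List.mem_pyRange_one] at h
  obtain ⟨i, ⟨hi0, hin⟩, j, ⟨hj1, hj2⟩, rfl⟩ := h
  exact ⟨hi0, by omega, hj2⟩

theorem pv_pairs_nodup (n : Nat) : (pvPairs n).Nodup := by
  unfold pvPairs
  rw [List.nodup_flatMap]
  refine ⟨fun i _ => (PySem.List.nodup_pyRange_one _ _).map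
    (fun a b h => by simpa using congrArg Prod.snd h), ?_⟩
  refine (PySem.List.nodup_pyRange_one (0 : Int) (n : Int)).imp ?_
  intro a b hab
  intro x hxa hxb
  simp only [List.mem_map] at hxa hxb
  obtain ⟨j, _, rfl⟩ := hxa
  obtain ⟨j', _, h⟩ := hxb
  have hfst := congrArg Prod.fst h
  simp at hfst; exact hab hfst.symm

theorem pv_items (positions : List (List Int)) :
    (calc_distances positions).items
      = (pvPairs positions.length).map (fun p => (p, pvDist positions p)) := by
  have hbody : (fun (d : PySem.Dict (Int × Int) Int) (i : Int) =>
      (PySem.List.pyRange (i + 1) (PySem.List.len positions) 1).foldl (fun d j =>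
        d.insert (i, j)
          ((PySem.List.pyGetD (PySem.List.pyGetD positions i []) 0 0
              - PySem.List.pyGetD (PySem.List.pyGetD positions j []) 0 0) ^ 2
            + (PySem.List.pyGetD (PySem.List.pyGetD positions i []) 1 0
              - PySem.List.pyGetD (PySem.List.pyGetD positions j []) 1 0) ^ 2
            + (PySem.List.pyGetD (PySem.List.pyGetD positions i []) 2 0
              - PySem.List.pyGetD (PySem.List.pyGetD positions j []) 2 0) ^ 2)) d)
      = (fun d i =>
        ((PySem.List.pyRange (i + 1) (PySem.List.len positions) 1).map (fun j => (i, j))).foldl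
          (fun d p => d.insert p (pvDist positions p)) d) := by
    funext d i
    rw [List.foldl_map]
    rfl
  unfold calc_distances
  rw [hbody]
  have := pv_foldl_flatMap (PySem.List.pyRange 0 (PySem.List.len positions) 1)
    (fun i => (PySem.List.pyRange (i + 1) (PySem.List.len positions) 1).map (fun j => (i, j)))
    (fun (d : PySem.Dict (Int × Int) Int) p => d.insert p (pvDist positions p))
    PySem.Dict.empty
  rw [← this]
  have hfresh := PySem.Dict.items_foldl_insert_fresh
    (pvPairs positions.length) (fun p => p) (fun p => pvDist positions p)
    (PySem.Dict.empty : PySem.Dict (Int × Int) Int)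
    (fun a _ => by simp [PySem.Dict.contains_empty])
    (by simpa [List.map_id'] using pv_pairs_nodup positions.length)
  simp only [PySem.List.len_eq] at *
  simpa [pvPairs] using hfresh

theorem pv_edges (positions : List (List Int)) :
    ((PySem.List.pyRange 0 (PySem.List.len positions) 1).foldl (fun edges i =>
      (PySem.List.pyRange (i + 1) (PySem.List.len positions) 1).foldl (fun edges j =>
        edges ++ [(((PySem.List.pyGetD (PySem.List.pyGetD positions i []) 0 0
              - PySem.List.pyGetD (PySem.List.pyGetD positions j []) 0 0) ^ 2
            + (PySem.List.pyGetD (PySem.List.pyGetD positions i []) 1 0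
              - PySem.List.pyGetD (PySem.List.pyGetD positions j []) 1 0) ^ 2
            + (PySem.List.pyGetD (PySem.List.pyGetD positions i []) 2 0
              - PySem.List.pyGetD (PySem.List.pyGetD positions j []) 2 0) ^ 2), i, j)])
        edges)
      ([] : List (Int × Int × Int)))
      = ((pvPairs positions.length).map (fun p => (p, pvDist positions p))).map pvPhi := by
  have hbody : (fun (edges : List (Int × Int × Int)) (i : Int) =>
      (PySem.List.pyRange (i + 1) (PySem.List.len positions) 1).foldl (fun edges j =>
        edges ++ [(((PySem.List.pyGetD (PySem.List.pyGetD positions i []) 0 0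
              - PySem.List.pyGetD (PySem.List.pyGetD positions j []) 0 0) ^ 2
            + (PySem.List.pyGetD (PySem.List.pyGetD positions i []) 1 0
              - PySem.List.pyGetD (PySem.List.pyGetD positions j []) 1 0) ^ 2
            + (PySem.List.pyGetD (PySem.List.pyGetD positions i []) 2 0
              - PySem.List.pyGetD (PySem.List.pyGetD positions j []) 2 0) ^ 2), i, j)])
        edges)
      = (fun edges i => edges ++
          (PySem.List.pyRange (i + 1) (PySem.List.len positions) 1).map
            (fun j => (pvDist positions (i, j), i, j))) := by
    funext edges i
    rw [PySem.List.foldl_append_singleton_eq_map]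
    rfl
  rw [hbody, PySem.List.foldl_append_eq_flatMap]
  simp only [pvPairs, List.map_flatMap, List.map_map, PySem.List.len_eq, List.nil_append]
  rfl

theorem pv_insertBy_map (x : (Int × Int) × Int) (ys : List ((Int × Int) × Int)) :
    PySem.List.insertBy (fun a b => decide (a.1 < b.1)) (pvPhi x) (ys.map pvPhi)
      = (PySem.List.insertBy (fun a b => decide (a.2 < b.2)) x ys).map pvPhi := by
  induction ys with
  | nil => simp [PySem.List.insertBy]
  | cons y ys ih =>
    simp only [List.map_cons, PySem.List.insertBy]
    by_cases h : x.2 < y.2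
    · rw [if_pos (by simpa [pvPhi] using h), if_pos (by simpa using h)]
      simp
    · rw [if_neg (by simpa [pvPhi] using h), if_neg (by simpa using h)]
      simp [ih]

theorem pv_sorted_map (xs : List ((Int × Int) × Int)) :
    PySem.List.sorted (xs.map pvPhi) (fun e => e.1)
      = (PySem.List.sorted xs (fun x => x.2)).map pvPhi := by
  rw [PySem.List.sorted_eq_foldl_insertBy, PySem.List.sorted_eq_foldl_insertBy, List.foldl_map]
  have : ∀ (acc : List ((Int × Int) × Int)),
      xs.foldl (fun acc x => PySem.List.insertBy (fun a b => decide (a.1 < b.1)) (pvPhi x) acc)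
        (acc.map pvPhi)
      = (xs.foldl (fun acc x => PySem.List.insertBy (fun a b => decide (a.2 < b.2)) x acc)
          acc).map pvPhi := by
    induction xs with
    | nil => simp
    | cons z zs ih => intro acc; simp only [List.foldl_cons, pv_insertBy_map, ← ih]
  simpa using this []

theorem pv_slice_map {α β : Type} (f : α → β) (l : List α) (m : Int) :
    PySem.List.slice (l.map f) none (some m) = (PySem.List.slice l none (some m)).map f := by
  simp [PySem.List.slice]

theorem pv_A_inner : ∀ (k m : Nat) (cs : List Int) (idx : Int) (a prev : Int),
    m + k = cs.length → 0 ≤ idx → idx.toNat < cs.length → PySem.List.pyGetD cs idx 0 = a →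
    a ≠ prev →
    (PySem.List.pyRange (m : Int) (cs.length : Int) 1).foldl
      (fun cs i =>
        if PySem.List.pyGetD cs i 0 = prev
        then PySem.List.pySetD cs i (PySem.List.pyGetD cs idx 0) else cs) cs
    = cs.take m ++ (cs.drop m).map (fun v => if v = prev then a else v) := by
  intro k
  induction k with
  | zero =>
    intro m cs idx a prev hm _ _ _ _
    rw [PySem.List.pyRange_one_eq_nil (by omega)]
    have : m = cs.length := by omega
    subst this
    simp [List.take_length]
  | succ k ih =>
    intro m cs idx a prev hm h2 h3 h4 h5
    have hmlt : m < cs.length := by omega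
    have h4' : cs[idx.toNat] = a := by
      rw [PySem.List.pyGetD_of_nonneg cs 0 h2, List.getD_eq_getElem?_getD,
        List.getElem?_eq_getElem h3] at h4
      simpa using h4
    have hcast : (m : Int) + 1 = ((m + 1 : Nat) : Int) := by push_cast; ring
    rw [PySem.List.pyRange_one_cons (by exact_mod_cast hmlt), List.foldl_cons]
    rw [List.drop_eq_getElem_cons hmlt, List.map_cons]
    simp only [PySem.List.pyGetD_natCast, List.getD_eq_getElem?_getD,
      List.getElem?_eq_getElem hmlt, Option.getD_some]
    by_cases hvm : cs[m] = prev
    · rw [if_pos hvm, if_pos hvm, h4, PySem.List.pySetD_natCast]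
      have hidxm : idx.toNat ≠ m := by
        intro hc; subst hc; exact h5 (h4'.symm.trans hvm)
      have hget' : PySem.List.pyGetD (cs.set m a) idx 0 = a := by
        rw [PySem.List.pyGetD_of_nonneg _ 0 h2, List.getD_eq_getElem?_getD, List.getElem?_set,
          if_neg (fun h => hidxm h.symm), List.getElem?_eq_getElem h3]
        simpa using h4'
      have hIH := ih (m + 1) (cs.set m a) idx a prev (by simp; omega) h2 (by simp; omega) hget' h5
      simp only [List.length_set] at hIH
      rw [hcast, hIH]
      rw [List.set_eq_take_append_cons_drop, if_pos hmlt]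
      have htl : (cs.take m).length = m := by simp [hmlt.le]
      have e1 : List.take (m + 1) (List.take m cs) = List.take m cs := by
        rw [List.take_take]; congr 1; omega
      have e2 : ∀ X : List Int, List.drop (m + 1) (List.take m X) = [] :=
        fun X => List.drop_eq_nil_of_le (le_trans (List.length_take_le m X) (by omega))
      simp [List.take_append, List.drop_append, htl, e1, e2]
    · rw [if_neg hvm, if_neg hvm]
      have hIH := ih (m + 1) cs idx a prev (by omega) h2 h3 h4 h5
      have e1 : List.take (m + 1) cs = List.take m cs ++ [cs[m]] := by
        rw [List.take_add_one, List.getElem?_eq_getElem hmlt]; rfl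
      rw [hcast, hIH, e1]
      simp only [List.append_assoc, List.singleton_append]

theorem pv_B_setfold_get (mb : List Int) (hmb : ∀ x ∈ mb, 0 ≤ x) (ls : List Int) (a : Int)
    (t : Nat) :
    (mb.foldl (fun c x => PySem.List.pySetD c x a) ls)[t]?
      = if (t : Int) ∈ mb ∧ t < ls.length then some a else ls[t]? := by
  induction mb generalizing ls with
  | nil => simp
  | cons x mb ih =>
    have hx : 0 ≤ x := hmb x (by simp)
    simp only [List.foldl_cons]
    rw [ih (fun y hy => hmb y (by simp [hy])), PySem.List.length_pySetD]
    by_cases ht : t < ls.length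
    · by_cases h1 : (t : Int) ∈ mb
      · rw [if_pos ⟨h1, ht⟩, if_pos ⟨by simp [h1], ht⟩]
      · rw [if_neg (by tauto), PySem.List.pySetD_of_nonneg _ _ hx, List.getElem?_set]
        by_cases hxt : x.toNat = t
        · simp [hxt, ht, show (t : Int) = x from by omega]
        · rw [if_neg hxt, if_neg (by simp only [List.mem_cons, h1, or_false]; intro hc; omega)]
    · rw [if_neg (by tauto), if_neg (by tauto)]
      rw [PySem.List.pySetD_of_nonneg _ _ hx]
      rw [List.getElem?_eq_none (by simpa using by omega),
          List.getElem?_eq_none (by omega)]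

theorem pv_members0_getD (n : Nat) (l : Int) :
    (((PySem.List.pyRange 0 (n : Int) 1).foldl (fun d i => d.insert i [i])
        (PySem.Dict.empty : PySem.Dict Int (List Int))).getD l [])
      = if 0 ≤ l ∧ l < (n : Int) then [l] else [] := by
  induction n with
  | zero =>
    rw [PySem.List.pyRange_one_eq_nil (by omega)]
    simp only [List.foldl_nil, PySem.Dict.getD_empty]
    rw [if_neg (by omega)]
  | succ n ih =>
    have h : ((n + 1 : Nat) : Int) = (n : Int) + 1 := by push_cast; ring
    rw [h, PySem.List.pyRange_one_succ_right (by positivity), List.foldl_append]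
    simp only [List.foldl_cons, List.foldl_nil, PySem.Dict.getD_insert, ih]
    by_cases hl : l = (n : Int)
    · rw [if_pos hl, if_pos (by omega)]; rw [hl]
    · rw [if_neg hl]
      by_cases hc : 0 ≤ l ∧ l < (n : Int)
      · rw [if_pos hc, if_pos (by omega)]
      · rw [if_neg hc, if_neg (by omega)]

theorem pv_getD_map (f : Int → Int) (cs : List Int) (t : Nat) (ht : t < cs.length) :
    (cs.map f).getD t 0 = f (cs.getD t 0) := by
  simp [List.getD_eq_getElem?_getD, ht]

theorem pv_step (circuits : List Int) (members : PySem.Dict Int (List Int))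
    (e : (Int × Int) × Int) (hi : 0 ≤ e.1.1) (hij : e.1.1 < e.1.2)
    (hj : e.1.2 < (circuits.length : Int)) (hInv : pvInv circuits members) :
    pvStepA circuits e = (pvStepB (circuits, members) (pvPhi e)).1
    ∧ (pvStepB (circuits, members) (pvPhi e)).1.length = circuits.length
    ∧ pvInv (pvStepB (circuits, members) (pvPhi e)).1 (pvStepB (circuits, members) (pvPhi e)).2 := by
  obtain ⟨⟨i, j⟩, dd⟩ := e
  simp only [pvStepA, pvStepB, pvPhi] at *
  by_cases hab : PySem.List.pyGetD circuits i 0 = PySem.List.pyGetD circuits j 0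
  · rw [if_neg (by simpa using hab), if_neg (by simpa using hab)]
    exact ⟨rfl, rfl, hInv⟩
  · set a := PySem.List.pyGetD circuits i 0 with ha
    set b := PySem.List.pyGetD circuits j 0 with hb
    rw [if_pos (by simpa using hab), if_pos (by simpa using hab)]
    set n := circuits.length with hn
    set f : Int → Int := fun v => if v = b then a else v with hf
    have hiR : PySem.Raise.InRange n i := ⟨by omega, by omega⟩
    have hjR : PySem.Raise.InRange n j := ⟨by omega, by omega⟩
    have hamem : a ∈ circuits := PySem.List.pyGetD_mem circuits 0 hiR
    have hbmem : b ∈ circuits := PySem.List.pyGetD_mem circuits 0 hjR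
    set mb := members.getD b [] with hmb
    have hmbiff : ∀ x : Int, x ∈ mb ↔ ∃ t : Nat, t < n ∧ x = (t : Int) ∧ circuits.getD t 0 = b :=
      hInv b hbmem
    have hmb0 : ∀ x ∈ mb, 0 ≤ x := by
      intro x hx
      obtain ⟨t, _, rfl, _⟩ := (hmbiff x).mp hx
      positivity
    have hfa : f a = a := by simp [hf]
    have hfb : f b = a := by simp [hf]
    have hfother : ∀ v, v ≠ b → f v = v := by intro v hv; simp [hf, hv]
    -- A's inner scan produces the relabelled list
    have hA : (PySem.List.pyRange 0 (PySem.List.len circuits) 1).foldl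
        (fun cs k =>
          if PySem.List.pyGetD cs k 0 = b
          then PySem.List.pySetD cs k (PySem.List.pyGetD cs i 0) else cs) circuits
        = circuits.map f := by
      have := pv_A_inner n 0 circuits i a b (by omega) hi (by omega) rfl hab
      simpa [PySem.List.len_eq] using this
    -- B's member relabelling produces the same list
    have hB : mb.foldl (fun ls x => PySem.List.pySetD ls x a) circuits = circuits.map f := by
      apply List.ext_getElem?
      intro t
      rw [pv_B_setfold_get mb hmb0 circuits a t]
      by_cases ht : t < n
      · rw [List.getElem?_map, List.getElem?_eq_getElem ht]
        have hgetD : circuits.getD t 0 = circuits[t] := by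
          rw [List.getD_eq_getElem?_getD, List.getElem?_eq_getElem ht]; rfl
        by_cases hm : (t : Int) ∈ mb
        · obtain ⟨t', ht', hteq, hval⟩ := (hmbiff _).mp hm
          have htt : t' = t := by omega
          rw [htt] at hval
          rw [if_pos ⟨hm, ht⟩]
          rw [hgetD] at hval
          simp [hf, hval]
        · rw [if_neg (by tauto)]
          have hvb : ¬ circuits[t] = b := by
            intro hc
            exact hm ((hmbiff _).mpr ⟨t, ht, rfl, by rw [hgetD, hc]⟩)
          simp [hf, hvb]
      · rw [if_neg (by tauto), List.getElem?_eq_none (by omega),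
          List.getElem?_eq_none (by simpa using by omega)]
    refine ⟨by rw [hA, hB], by rw [hB]; simpa using hn.symm, ?_⟩
    -- the invariant is preserved
    show pvInv (mb.foldl (fun ls x => PySem.List.pySetD ls x a) circuits)
      (members.modify a [] (fun l => l ++ mb))
    rw [hB]
    intro l hl x
    simp only [List.length_map]
    obtain ⟨v, hv, hfv⟩ := List.mem_map.mp hl
    have hlb : l ≠ b := by
      intro hc
      by_cases hvb : v = b
      · rw [hvb, hfb] at hfv; exact hab (hfv.trans hc)
      · rw [hfother v hvb] at hfv; exact hvb (hfv.trans hc)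
    by_cases hla : l = a
    · subst hla
      rw [PySem.Dict.getD_modify_self]
      constructor
      · intro hx
        rcases List.mem_append.mp hx with hx1 | hx2
        · obtain ⟨t, ht, rfl, hval⟩ := (hInv a hamem x).mp hx1
          exact ⟨t, ht, rfl, by rw [pv_getD_map f circuits t ht, hval, hfa]⟩
        · obtain ⟨t, ht, rfl, hval⟩ := (hmbiff x).mp hx2
          exact ⟨t, ht, rfl, by rw [pv_getD_map f circuits t ht, hval, hfb]⟩
      · rintro ⟨t, ht, hxe, hval⟩
        rw [pv_getD_map f circuits t ht] at hval
        by_cases hvb2 : circuits.getD t 0 = b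
        · exact List.mem_append.mpr (Or.inr ((hmbiff x).mpr ⟨t, ht, hxe, hvb2⟩))
        · have : circuits.getD t 0 = a := by rw [hfother _ hvb2] at hval; exact hval
          exact List.mem_append.mpr (Or.inl ((hInv a hamem x).mpr ⟨t, ht, hxe, this⟩))
    · have hvb : v ≠ b := by
        intro hc; rw [hc, hfb] at hfv; exact hla hfv.symm
      have hlv : l = v := by rw [hfother v hvb] at hfv; exact hfv.symm
      have hlcirc : l ∈ circuits := hlv ▸ hv
      rw [PySem.Dict.getD_modify_of_ne _ _ _ hla]
      constructor
      · rintro hx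
        obtain ⟨t, ht, hxe, hval⟩ := (hInv l hlcirc x).mp hx
        exact ⟨t, ht, hxe, by rw [pv_getD_map f circuits t ht, hval, hfother l hlb]⟩
      · rintro ⟨t, ht, hxe, hval⟩
        rw [pv_getD_map f circuits t ht] at hval
        have : circuits.getD t 0 = l := by
          by_cases hvb2 : circuits.getD t 0 = b
          · rw [hvb2, hfb] at hval; exact absurd hval.symm hla
          · rw [hfother _ hvb2] at hval; exact hval
        exact (hInv l hlcirc x).mpr ⟨t, ht, hxe, this⟩

theorem pv_mainfold (E : List ((Int × Int) × Int)) :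
    ∀ (circuits : List Int) (members : PySem.Dict Int (List Int)),
    (∀ e ∈ E, 0 ≤ e.1.1 ∧ e.1.1 < e.1.2 ∧ e.1.2 < (circuits.length : Int)) →
    pvInv circuits members →
    E.foldl pvStepA circuits = ((E.map pvPhi).foldl pvStepB (circuits, members)).1 := by
  induction E with
  | nil => intro circuits members _ _; rfl
  | cons e E ih =>
    intro circuits members hE hInv
    obtain ⟨h1, h2, h3⟩ := hE e (by simp)
    obtain ⟨hAB, hlen, hInv'⟩ := pv_step circuits members e h1 h2 h3 hInv
    simp only [List.map_cons, List.foldl_cons]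
    rw [hAB]
    have := ih (pvStepB (circuits, members) (pvPhi e)).1 (pvStepB (circuits, members) (pvPhi e)).2
      (fun e' he' => by
        obtain ⟨g1, g2, g3⟩ := hE e' (by simp [he'])
        exact ⟨g1, g2, by rw [hlen]; exact g3⟩)
      hInv'
    simpa using this

theorem pv_circuits0_getD (n : Nat) (t : Nat) (ht : t < n) :
    (PySem.List.pyRange 0 (n : Int) 1).getD t 0 = (t : Int) := by
  have hlen : (PySem.List.pyRange 0 (n : Int) 1).length = n := by
    rw [PySem.List.length_pyRange_one]; omega
  rw [List.getD_eq_getElem?_getD, List.getElem?_eq_getElem (by omega)]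
  simp [PySem.List.getElem_pyRange_one]

theorem pv_inv0 (n : Nat) :
    pvInv (PySem.List.pyRange 0 (n : Int) 1)
      ((PySem.List.pyRange 0 (n : Int) 1).foldl (fun d i => d.insert i [i])
        (PySem.Dict.empty : PySem.Dict Int (List Int))) := by
  have hlen : (PySem.List.pyRange 0 (n : Int) 1).length = n := by
    rw [PySem.List.length_pyRange_one]; omega
  intro l hl x
  rw [PySem.List.mem_pyRange_one] at hl
  rw [pv_members0_getD n l, if_pos hl, hlen]
  constructor
  · intro hx
    rw [List.mem_singleton] at hx
    refine ⟨l.toNat, by omega, by omega, ?_⟩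
    rw [pv_circuits0_getD n l.toNat (by omega)]
    omega
  · rintro ⟨t, ht, rfl, hval⟩
    rw [pv_circuits0_getD n t ht] at hval
    simp [hval]

-- ===== VERDICT (by name: the statement is the Claim_ definition above) =====
theorem build_circuits_spec : Claim_equal_build_circuits := by
  intro positions max_connections _ _
  unfold Spec_build_circuits build_circuits build_circuits_alt
  simp only [pv_edges, pv_items, pv_sorted_map, pv_slice_map, List.map_id']
  simp only [PySem.List.len_eq]
  have hlen : (PySem.List.pyRange 0 ((positions.length : Int)) 1).length = positions.length := by
    rw [PySem.List.length_pyRange_one]; omega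
  have hb : ∀ e ∈ PySem.List.slice
      (PySem.List.sorted ((pvPairs positions.length).map (fun p => (p, pvDist positions p)))
        (fun x => x.2)) none (some max_connections),
      0 ≤ e.1.1 ∧ e.1.1 < e.1.2 ∧
        e.1.2 < ((PySem.List.pyRange 0 ((positions.length : Int)) 1).length : Int) := by
    intro e he
    have hmem : e ∈ (pvPairs positions.length).map (fun p => (p, pvDist positions p)) :=
      (PySem.List.mem_sorted _ _ _ _).mp (PySem.List.mem_of_mem_slice _ _ _ he)
    obtain ⟨p, hp, rfl⟩ := List.mem_map.mp hmem
    obtain ⟨g1, g2, g3⟩ := pv_mem_pairs hp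
    exact ⟨g1, g2, by rw [hlen]; exact g3⟩
  rw [← pv_mainfold _ _ _ hb (pv_inv0 positions.length)]
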